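-- pv_equiv track=rewrite | github.com/Git-Suraj-hub/PYTHON-FULL | Python-practice/Factorial.py | trail
-- ===== SOURCE A (Python) =====
-- def trail(n):
--     zero = 0
--     while n > 0:
--         c = n % 10
--         if c == 0:
--             zero += 1
--             n = n // 10
--         else:
--             break
--     return zero
-- ===== SOURCE B (Python) =====
-- def trail(n):
--     if n <= 0:
--         return 0
--     v2 = 0
--     m = n
--     while m % 2 == 0:
--         v2 += 1
--         m //= 2
--     v5 = 0
--     m = n
--     while m % 5 == 0:
--         v5 += 1
--         m //= 5
--     return min(v2, v5)
-- ===== Notes on version B (the rewrite author's own statement) =====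
-- stated objective: alternative
-- what changed: Replaces the peel-one-trailing-zero-digit loop (repeated modulus/division by ten) with computing the multiplicities of the factors two and five of n separately and returning their minimum, which equals the number of trailing decimal zeros.
import Mathlib
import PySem

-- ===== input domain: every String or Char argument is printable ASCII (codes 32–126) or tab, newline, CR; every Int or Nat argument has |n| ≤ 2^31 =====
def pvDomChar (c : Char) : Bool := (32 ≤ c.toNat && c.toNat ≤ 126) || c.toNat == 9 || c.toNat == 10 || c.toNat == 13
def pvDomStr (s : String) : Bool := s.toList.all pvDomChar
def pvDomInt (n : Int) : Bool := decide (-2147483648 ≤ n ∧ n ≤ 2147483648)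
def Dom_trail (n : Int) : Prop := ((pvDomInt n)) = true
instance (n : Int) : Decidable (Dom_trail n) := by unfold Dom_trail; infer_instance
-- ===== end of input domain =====

-- B changes the algorithm (min of the 2-adic and 5-adic valuations instead of peeling
-- trailing zero digits); equivalence of the RETURN values is proved for all Int inputs.

-- ===== PORT A =====
-- while n > 0: c = n % 10; if c == 0: zero += 1; n //= 10 else: break
def trailLoop (n : Int) (zero : Int) : Int :=
  if h : 0 < n then
    if PySem.Int.mod n 10 = 0 then
      trailLoop (PySem.Int.floordiv n 10) (zero + 1)
    else zero
  else zero
termination_by n.toNat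
decreasing_by
  have : PySem.Int.floordiv n 10 = n / 10 := by
    exact PySem.Int.floordiv_eq_ediv_of_pos (by norm_num)
  omega

def trail (n : Int) : Int := trailLoop n 0

-- ===== PORT B =====
-- while m % 2 == 0: v2 += 1; m //= 2   (the 0 < m guard only makes the loop total in Lean;
-- in Python m > 0 is an invariant of the call site)
def count2 (m : Int) : Int :=
  if h : 0 < m ∧ PySem.Int.mod m 2 = 0 then
    1 + count2 (PySem.Int.floordiv m 2)
  else 0
termination_by m.toNat
decreasing_by
  have : PySem.Int.floordiv m 2 = m / 2 := by
    exact PySem.Int.floordiv_eq_ediv_of_pos (by norm_num)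
  omega

def count5 (m : Int) : Int :=
  if h : 0 < m ∧ PySem.Int.mod m 5 = 0 then
    1 + count5 (PySem.Int.floordiv m 5)
  else 0
termination_by m.toNat
decreasing_by
  have : PySem.Int.floordiv m 5 = m / 5 := by
    exact PySem.Int.floordiv_eq_ediv_of_pos (by norm_num)
  omega

def trail_alt (n : Int) : Int :=
  if n ≤ 0 then 0
  else min (count2 n) (count5 n)

-- ===== PRECONDITION & SPEC =====
def Spec_trail (n : Int) (out : Int) : Prop := out = trail_alt n
instance (n : Int) (out : Int) : Decidable (Spec_trail n out) := by unfold Spec_trail; infer_instance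

-- ===== CLAIM (what is proved, stated in full; the proofs are below) =====
def Claim_equal_trail : Prop := ∀ (n : Int), Dom_trail n → Spec_trail n (trail n)

-- ===== LEMMAS AND PROOFS =====
theorem count2_nonneg (m : Int) : 0 ≤ count2 m := by
  rw [count2]
  split_ifs with h
  · have := count2_nonneg (PySem.Int.floordiv m 2)
    omega
  · omega
termination_by m.toNat
decreasing_by
  have : PySem.Int.floordiv m 2 = m / 2 := PySem.Int.floordiv_eq_ediv_of_pos (by norm_num)
  omega

theorem count5_nonneg (m : Int) : 0 ≤ count5 m := by
  rw [count5]
  split_ifs with h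
  · have := count5_nonneg (PySem.Int.floordiv m 5)
    omega
  · omega
termination_by m.toNat
decreasing_by
  have : PySem.Int.floordiv m 5 = m / 5 := PySem.Int.floordiv_eq_ediv_of_pos (by norm_num)
  omega

theorem count2_eq (m : Int) :
    count2 m = if 0 < m ∧ m % 2 = 0 then 1 + count2 (m / 2) else 0 := by
  rw [count2]
  rw [PySem.Int.mod_eq_emod_of_pos (by norm_num : (0:Int) < 2),
      PySem.Int.floordiv_eq_ediv_of_pos (by norm_num : (0:Int) < 2)]
  split_ifs <;> simp_all

theorem count5_eq (m : Int) :
    count5 m = if 0 < m ∧ m % 5 = 0 then 1 + count5 (m / 5) else 0 := by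
  rw [count5]
  rw [PySem.Int.mod_eq_emod_of_pos (by norm_num : (0:Int) < 5),
      PySem.Int.floordiv_eq_ediv_of_pos (by norm_num : (0:Int) < 5)]
  split_ifs <;> simp_all

-- dividing out a factor of 5 does not change the 2-adic valuation
theorem count2_div5 : ∀ (k : Nat) (m : Int), m.toNat ≤ k → 0 < m → 5 ∣ m →
    count2 (m / 5) = count2 m := by
  intro k
  induction k with
  | zero => intro m hk hm _; omega
  | succ k ih =>
    intro m hk hm h5
    by_cases h2 : (2:Int) ∣ m
    · have h10 : (10:Int) ∣ m := by omega
      obtain ⟨j, hj⟩ := h10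
      have hj0 : 0 < j := by omega
      have e1 : m / 5 = 2 * j := by omega
      have e2 : m / 2 = 5 * j := by omega
      have e3 : (2 * j) / 2 = j := by omega
      rw [e1, count2_eq, if_pos (by constructor <;> omega), e3,
          count2_eq (m := m), if_pos (by omega), e2,
          ← ih (5 * j) (by omega) (by omega) ⟨j, by ring⟩]
      have : (5 * j) / 5 = j := by omega
      rw [this]
    · rw [count2_eq, count2_eq (m := m), if_neg (by omega), if_neg (by omega)]

-- dividing out a factor of 2 does not change the 5-adic valuation
theorem count5_div2 : ∀ (k : Nat) (m : Int), m.toNat ≤ k → 0 < m → 2 ∣ m →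
    count5 (m / 2) = count5 m := by
  intro k
  induction k with
  | zero => intro m hk hm _; omega
  | succ k ih =>
    intro m hk hm h2
    by_cases h5 : (5:Int) ∣ m
    · have h10 : (10:Int) ∣ m := by omega
      obtain ⟨j, hj⟩ := h10
      have hj0 : 0 < j := by omega
      have e1 : m / 2 = 5 * j := by omega
      have e2 : m / 5 = 2 * j := by omega
      have e3 : (5 * j) / 5 = j := by omega
      rw [e1, count5_eq, if_pos (by constructor <;> omega), e3,
          count5_eq (m := m), if_pos (by omega), e2,
          ← ih (2 * j) (by omega) (by omega) ⟨j, by ring⟩]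
      have : (2 * j) / 2 = j := by omega
      rw [this]
    · rw [count5_eq, count5_eq (m := m), if_neg (by omega), if_neg (by omega)]

theorem trailLoop_eq (m : Int) (z : Int) :
    trailLoop m z = if 0 < m ∧ m % 10 = 0 then trailLoop (m / 10) (z + 1) else z := by
  rw [trailLoop]
  rw [PySem.Int.mod_eq_emod_of_pos (by norm_num : (0:Int) < 10),
      PySem.Int.floordiv_eq_ediv_of_pos (by norm_num : (0:Int) < 10)]
  split_ifs <;> simp_all

theorem trailLoop_min : ∀ (k : Nat) (m : Int), m.toNat ≤ k → 0 < m → ∀ z,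
    trailLoop m z = z + min (count2 m) (count5 m) := by
  intro k
  induction k with
  | zero => intro m hk hm _; omega
  | succ k ih =>
    intro m hk hm z
    rw [trailLoop_eq]
    by_cases h10 : m % 10 = 0
    · obtain ⟨j, hj⟩ : (10:Int) ∣ m := by omega
      have hj0 : 0 < j := by omega
      have e10 : m / 10 = j := by omega
      have e2 : m / 2 = 5 * j := by omega
      have e5 : m / 5 = 2 * j := by omega
      have c2 : count2 m = 1 + count2 j := by
        rw [count2_eq (m := m), if_pos (by omega), e2,
            ← count2_div5 k (5 * j) (by omega) (by omega) ⟨j, by ring⟩]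
        have : (5 * j) / 5 = j := by omega
        rw [this]
      have c5 : count5 m = 1 + count5 j := by
        rw [count5_eq (m := m), if_pos (by omega), e5,
            ← count5_div2 k (2 * j) (by omega) (by omega) ⟨j, by ring⟩]
        have : (2 * j) / 2 = j := by omega
        rw [this]
      rw [if_pos (by omega), e10, ih j (by omega) hj0 (z + 1), c2, c5]
      omega
    · rw [if_neg (by omega)]
      have h2 := count2_nonneg m
      have h5 := count5_nonneg m
      by_cases h2d : m % 2 = 0
      · have : m % 5 ≠ 0 := by omega
        rw [count5_eq, if_neg (by omega)]
        omega
      · rw [count2_eq, if_neg (by omega)]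
        omega

-- ===== VERDICT (by name: the statement is the Claim_ definition above) =====
theorem trail_spec : Claim_equal_trail := by
  intro n _
  unfold Spec_trail trail trail_alt
  by_cases hn : n ≤ 0
  · rw [trailLoop_eq, if_neg (by omega), if_pos hn]
  · rw [if_neg hn, trailLoop_min n.toNat n le_rfl (by omega) 0]
    omega
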